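-- pv_equiv track=rewrite | github.com/jason89923/CYCU_chat_bot | line_bot/get_time_condition.py | get_time_conditions
-- ===== SOURCE A (Python) =====
-- date_range = set(['1', '2', '3', '4', '5'])
--
-- time_range = set(['1', '2', '3', '4', '5', '6', '7', '8', 'C', 'D', 'E', 'F'])
--
-- separator = set([' ', '\n', '\t', ','])
--
-- def get_token(input_msg: str):
--     input_msg = input_msg.upper()
--     date = ''
--     time = ''
--     while len(input_msg) > 0:
--         first = input_msg[0]
--         input_msg = input_msg[1:]
--         if first in date_range:
--             date = first
--             break
--
--     if date == '':
--         return None, None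
--
--     while len(input_msg) > 0:
--         first = input_msg[0]
--         input_msg = input_msg[1:]
--         if first == '-':
--             break
--
--     if len(input_msg) == 0:
--         return None, None
--
--     while len(input_msg) > 0:
--         first = input_msg[0]
--         input_msg = input_msg[1:]
--         if first in time_range:
--             time += first
--         elif first in separator and time != '':
--             break
--
--     if time == '':
--         return None, None
--
--     time = set(time)
--     time = ''.join(sorted(time))
--     return f'{date}-{time}', input_msg
--
-- def get_time_conditions(input_msg: str):
--     conditions = []
--     while len(input_msg) > 0:
--         token, input_msg = get_token(input_msg)
--         if token is None:
--             break
--         conditions.append(token)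
--     return conditions
-- ===== SOURCE B (Python) =====
-- date_range = set('12345')
-- time_range = set('12345678CDEF')
-- separator = set(' \n\t,')
--
-- def get_time_conditions(input_msg: str):
--     # One flat state-machine pass over the uppercased string; no tokenizer helper.
--     conditions = []
--     state = 0          # 0: looking for date, 1: looking for '-', 2: reading time chars
--     date = ''
--     acc = ''
--     for c in input_msg.upper():
--         if state == 0:
--             if c in date_range:
--                 date = c
--                 state = 1
--         elif state == 1:
--             if c == '-':
--                 acc = ''
--                 state = 2
--         else:
--             if c in time_range:
--                 acc += c
--             elif c in separator and acc:
--                 conditions.append(f"{date}-{''.join(sorted(set(acc)))}")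
--                 state = 0
--     if state == 2 and acc:
--         conditions.append(f"{date}-{''.join(sorted(set(acc)))}")
--     return conditions
-- ===== Notes on version B (the rewrite author's own statement) =====
-- stated objective: faster
-- what changed: Replaces A's repeatedly-called suffix-returning tokenizer (get_token, which re-uppercases and rebuilds the remaining string one character-slice at a time) with one flat left-to-right state-machine pass over the string uppercased once, emitting conditions inline and flushing at end of input.
import Mathlib
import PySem

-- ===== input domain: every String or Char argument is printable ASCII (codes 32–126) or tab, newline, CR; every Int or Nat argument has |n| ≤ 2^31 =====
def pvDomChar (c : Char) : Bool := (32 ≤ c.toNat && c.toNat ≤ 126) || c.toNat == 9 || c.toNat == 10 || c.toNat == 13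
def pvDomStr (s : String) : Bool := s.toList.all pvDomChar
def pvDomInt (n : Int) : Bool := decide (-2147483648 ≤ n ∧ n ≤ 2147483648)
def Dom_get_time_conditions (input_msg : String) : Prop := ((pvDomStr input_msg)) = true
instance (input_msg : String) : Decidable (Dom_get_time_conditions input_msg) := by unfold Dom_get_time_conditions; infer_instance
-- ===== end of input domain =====

-- B replaces A's repeated suffix-returning tokenizer (get_token called in a loop, re-uppercasing
-- each remainder, one char-slice at a time) by one flat state-machine pass over the string uppercased once (objective: faster; measured).

-- ===== PORT A =====
-- module-level constants date_range / time_range / separator (used by both versions, as in the Python module)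
def dateRange : List Char := ['1','2','3','4','5']
def timeRange : List Char := ['1','2','3','4','5','6','7','8','C','D','E','F']
def sepChars : List Char := [' ', '\n', '\t', ',']

-- first while-loop of get_token: scan for a date char, return it with the remaining suffix
def findDate : List Char → Option (Char × List Char)
  | [] => none
  | c :: rest => if c ∈ dateRange then some (c, rest) else findDate rest

-- second while-loop: scan past chars up to and including the first '-'
def findDash : List Char → List Char
  | [] => []
  | c :: rest => if c = '-' then rest else findDash rest

-- third while-loop: collect time chars, break on a separator once time is nonempty
def collectTime : List Char → List Char → List Char × List Char
  | [], time => ([], time)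
  | c :: rest, time =>
    if c ∈ timeRange then collectTime rest (time ++ [c])
    else if c ∈ sepChars ∧ time ≠ [] then (rest, time)
    else collectTime rest time

-- ''.join(sorted(set(time)))
def joinSortedSet (time : List Char) : List Char :=
  PySem.List.sorted (PySem.Set.ofList time) (fun x => x) false

def get_token (input_msg : String) : Option (String × String) :=
  let l := (PySem.Str.upper input_msg).toList
  match findDate l with
  | none => none
  | some (d, rest) =>
    let r2 := findDash rest
    if r2 = [] then none
    else
      let p := collectTime r2 []
      if p.2 = [] then none
      else some (String.ofList (d :: '-' :: joinSortedSet p.2), String.ofList p.1)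

-- the port of get_time_conditions cites this for termination (the remainder get_token returns is shorter)
theorem get_token_rest_lt {s : String} {tok rest : String}
    (h : get_token s = some (tok, rest)) : rest.toList.length < s.toList.length := by
  have hfd : ∀ l d r, findDate l = some (d, r) → r.length < l.length := by
    intro l
    induction l with
    | nil => intro d r h; simp [findDate] at h
    | cons c rest ih =>
      intro d r h
      by_cases hc : c ∈ dateRange
      · simp [findDate, hc] at h
        simp [h.2]
      · simp [findDate, hc] at h
        have := ih d r h
        simp; omega
  have hda : ∀ r : List Char, (findDash r).length ≤ r.length := by
    intro r
    induction r with
    | nil => simp [findDash]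
    | cons c rest ih =>
      by_cases hc : c = '-'
      · simp [findDash, hc]
      · simp [findDash, hc]; omega
  have hct : ∀ (l acc : List Char), (collectTime l acc).1.length ≤ l.length := by
    intro l
    induction l with
    | nil => intro acc; simp [collectTime]
    | cons c rest ih =>
      intro acc
      by_cases h1 : c ∈ timeRange
      · simp [collectTime, h1]
        have := ih (acc ++ [c]); omega
      · by_cases h2 : c ∈ sepChars ∧ acc ≠ []
        · simp [collectTime, h1, h2]
        · simp [collectTime, h1, h2]
          have := ih acc; omega
  have hlen : ((PySem.Str.upper s).toList).length = s.toList.length := by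
    rw [PySem.Str.toList_upper]
    unfold PySem.Chars.upper
    simp
  simp only [get_token] at h
  rcases h1 : findDate ((PySem.Str.upper s).toList) with _ | ⟨d, r⟩ <;> rw [h1] at h
  · simp at h
  · simp only [] at h
    split_ifs at h with h2 h3
    all_goals simp only [Option.some.injEq, Prod.mk.injEq] at h
    have hr : rest = String.ofList (collectTime (findDash r) []).1 := h.2.symm
    have := hct (findDash r) []
    have := hda r
    have := hfd _ _ _ h1
    rw [hr, String.toList_ofList]
    omega

def get_time_conditions (input_msg : String) : List String :=
  if input_msg.toList.length = 0 then []
  else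
    match hg : get_token input_msg with
    | none => []
    | some (tok, rest) => tok :: get_time_conditions rest
termination_by input_msg.toList.length
decreasing_by exact get_token_rest_lt hg

-- ===== PORT B =====
-- state of the single-pass scanner: looking for a date / looking for '-' / reading time chars
inductive BState where
  | s0 : BState
  | s1 : Char → BState
  | s2 : Char → List Char → BState
deriving DecidableEq, Repr

-- B's ''.join(sorted(set(acc)))
def bToken (d : Char) (acc : List Char) : String :=
  String.ofList (d :: '-' :: PySem.List.sorted (PySem.Set.ofList acc) (fun x => x) false)

-- the for-loop of B over the uppercased chars, plus the final flush at end of input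
def bRun : List Char → BState → List String
  | [], st => match st with
    | BState.s2 d acc => if acc ≠ [] then [bToken d acc] else []
    | _ => []
  | c :: rest, BState.s0 => if c ∈ dateRange then bRun rest (BState.s1 c) else bRun rest BState.s0
  | c :: rest, BState.s1 d => if c = '-' then bRun rest (BState.s2 d []) else bRun rest (BState.s1 d)
  | c :: rest, BState.s2 d acc =>
    if c ∈ timeRange then bRun rest (BState.s2 d (acc ++ [c]))
    else if c ∈ sepChars ∧ acc ≠ [] then bToken d acc :: bRun rest BState.s0
    else bRun rest (BState.s2 d acc)

def get_time_conditions_alt (input_msg : String) : List String :=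
  bRun (PySem.Str.upper input_msg).toList BState.s0

-- ===== PRECONDITION & SPEC =====
def Spec_get_time_conditions (input_msg : String) (out : List String) : Prop := out = get_time_conditions_alt input_msg
instance (input_msg : String) (out : List String) : Decidable (Spec_get_time_conditions input_msg out) := by unfold Spec_get_time_conditions; infer_instance

-- ===== CLAIM (what is proved, stated in full; the proofs are below) =====
def Claim_equal_get_time_conditions : Prop := ∀ (input_msg : String), Dom_get_time_conditions input_msg → Spec_get_time_conditions input_msg (get_time_conditions input_msg)

-- ===== LEMMAS AND PROOFS =====

theorem upperChar_idem (c : Char) :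
    PySem.Chars.upperChar (PySem.Chars.upperChar c) = PySem.Chars.upperChar c := by
  unfold PySem.Chars.upperChar PySem.Chars.islower
  by_cases h1 : 'a' <= c
  . by_cases h2 : c <= 'z'
    . have hlo : 97 <= c.toNat := h1
      have hhi : c.toNat <= 122 := h2
      have hv : (c.toNat - 32).isValidChar := by left; omega
      have ht : (Char.ofNat (c.toNat - 32)).toNat = c.toNat - 32 := by
        rw [Char.ofNat, dif_pos hv]; rfl
      simp only [h1, h2, decide_true, Bool.and_self, if_true]
      have hne : ¬ ('a' <= Char.ofNat (c.toNat - 32)) := by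
        intro hle
        have : 97 <= (Char.ofNat (c.toNat - 32)).toNat := hle
        omega
      simp [hne]
    . simp [h2]
  . simp [h1]

theorem upper_fixed {l : List Char} {c : Char} (h : c ∈ PySem.Chars.upper l) :
    PySem.Chars.upperChar c = c := by
  unfold PySem.Chars.upper at h
  rcases List.mem_map.mp h with ⟨a, _, rfl⟩
  exact upperChar_idem a

theorem upper_of_fixed {l : List Char} (h : ∀ c ∈ l, PySem.Chars.upperChar c = c) :
    PySem.Chars.upper l = l := by
  unfold PySem.Chars.upper
  calc l.map PySem.Chars.upperChar = l.map id := List.map_congr_left h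
    _ = l := List.map_id l

-- A's first loop against B's state s0
theorem bRun_findDate_none : ∀ l : List Char, findDate l = none → bRun l BState.s0 = [] := by
  intro l
  induction l with
  | nil => intro _; simp [bRun]
  | cons c rest ih =>
    intro h
    by_cases hc : c ∈ dateRange
    . simp [findDate, hc] at h
    . simp [findDate, hc] at h
      simp [bRun, hc, ih h]

theorem bRun_findDate_some : ∀ (l : List Char) (d : Char) (r : List Char),
    findDate l = some (d, r) →
    bRun l BState.s0 = bRun r (BState.s1 d) ∧ r <:+ l ∧ r.length < l.length := by
  intro l
  induction l with
  | nil => intro d r h; simp [findDate] at h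
  | cons c rest ih =>
    intro d r h
    by_cases hc : c ∈ dateRange
    . simp [findDate, hc] at h
      obtain ⟨rfl, rfl⟩ := h
      exact ⟨by simp [bRun, hc], List.suffix_cons c rest, by simp⟩
    . simp [findDate, hc] at h
      rcases ih d r h with ⟨h1, h2, h3⟩
      refine ⟨by simp [bRun, hc, h1], h2.trans (List.suffix_cons c rest), ?_⟩
      simp; omega

-- A's second loop against B's state s1: no dash anywhere
theorem bRun_noDash : ∀ (r : List Char) (d : Char), '-' ∉ r →
    findDash r = [] ∧ bRun r (BState.s1 d) = [] := by
  intro r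
  induction r with
  | nil => intro d _; simp [findDash, bRun]
  | cons c rest ih =>
    intro d h
    have hc : c ≠ '-' := fun hc => h (by simp [hc])
    have hrest : '-' ∉ rest := fun hm => h (by simp [hm])
    rcases ih d hrest with ⟨h1, h2⟩
    constructor
    . simp [findDash, hc, h1]
    . simp [bRun, hc, h2]

-- A's second loop against B's state s1: dash present
theorem bRun_dash : ∀ (r : List Char) (d : Char), '-' ∈ r →
    bRun r (BState.s1 d) = bRun (findDash r) (BState.s2 d []) ∧ findDash r <:+ r := by
  intro r
  induction r with
  | nil => intro d h; simp at h
  | cons c rest ih =>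
    intro d h
    by_cases hc : c = '-'
    . subst hc
      exact ⟨by simp [bRun, findDash], by simp [findDash]⟩
    . have hm : '-' ∈ rest := by rcases List.mem_cons.mp h with h | h; exact absurd h.symm hc; exact h
      rcases ih d hm with ⟨h1, h2⟩
      refine ⟨by simp [bRun, hc, h1, findDash], ?_⟩
      simp [findDash, hc]
      exact h2.trans (List.suffix_cons c rest)

-- A's third loop against B's state s2 (including the end-of-input flush)
theorem bRun_collect : ∀ (l : List Char) (d : Char) (acc : List Char),
    (bRun l (BState.s2 d acc) =
      if (collectTime l acc).2 = [] then []
      else bToken d (collectTime l acc).2 :: bRun (collectTime l acc).1 BState.s0)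
    ∧ (collectTime l acc).1 <:+ l := by
  intro l
  induction l with
  | nil =>
    intro d acc
    refine ⟨?_, by simp [collectTime]⟩
    by_cases h : acc = []
    . simp [bRun, collectTime, h]
    . simp [bRun, collectTime, h]
  | cons c rest ih =>
    intro d acc
    by_cases h1 : c ∈ timeRange
    . rcases ih d (acc ++ [c]) with ⟨ha, hb⟩
      refine ⟨?_, ?_⟩
      . simp [bRun, h1, collectTime, ha]
      . simp [collectTime, h1]
        exact hb.trans (List.suffix_cons c rest)
    . by_cases h2 : c ∈ sepChars ∧ acc ≠ []
      . refine ⟨?_, ?_⟩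
        . simp [bRun, h1, h2, collectTime]
        . simp [collectTime, h1, h2]
      . rcases ih d acc with ⟨ha, hb⟩
        refine ⟨?_, ?_⟩
        . simp [bRun, h1, h2, collectTime, ha]
        . simp [collectTime, h1, h2]
          exact hb.trans (List.suffix_cons c rest)

-- the main induction: A's tokenizer loop equals B's single pass, on the uppercased char list
theorem gtc_eq_bRun : ∀ (n : Nat) (s : String), s.toList.length ≤ n →
    get_time_conditions s = bRun (PySem.Chars.upper s.toList) BState.s0 := by
  intro n
  induction n with
  | zero =>
    intro s hs
    have h0 : s.toList = [] := List.eq_nil_of_length_eq_zero (Nat.le_zero.mp hs)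
    rw [get_time_conditions]
    simp [h0, PySem.Chars.upper, bRun]
  | succ n ih =>
    intro s hs
    by_cases h0 : s.toList.length = 0
    . rw [get_time_conditions]
      have h0' : s.toList = [] := List.eq_nil_of_length_eq_zero h0
      simp [h0', PySem.Chars.upper, bRun]
    . rw [get_time_conditions]
      rw [if_neg h0]
      have hl : (PySem.Str.upper s).toList = PySem.Chars.upper s.toList := PySem.Str.toList_upper s
      have hlen : (PySem.Chars.upper s.toList).length = s.toList.length := by
        unfold PySem.Chars.upper; simp
      rcases hfd : findDate (PySem.Chars.upper s.toList) with _ | ⟨d, r⟩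
      . have hA : get_token s = none := by simp [get_token, hl, hfd]
        rw [hA, bRun_findDate_none _ hfd]
      . obtain ⟨hB1, hsuf1, hlt1⟩ := bRun_findDate_some _ _ _ hfd
        by_cases hdash : '-' ∈ r
        . obtain ⟨hB2, hsuf2⟩ := bRun_dash r d hdash
          obtain ⟨hB3, hsuf3⟩ := bRun_collect (findDash r) d []
          by_cases hct : (collectTime (findDash r) []).2 = []
          . have hA : get_token s = none := by
              simp [get_token, hl, hfd, hct]
            rw [hA, hB1, hB2, hB3, if_pos hct]
          . have hr2 : findDash r ≠ [] := by
              intro he; rw [he] at hct; simp [collectTime] at hct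
            have hA : get_token s = some (String.ofList (d :: '-' :: joinSortedSet (collectTime (findDash r) []).2), String.ofList (collectTime (findDash r) []).1) := by
              simp [get_token, hl, hfd, hr2, hct]
            rw [hA, hB1, hB2, hB3, if_neg hct]
            have htok : String.ofList (d :: '-' :: joinSortedSet (collectTime (findDash r) []).2) = bToken d (collectTime (findDash r) []).2 := rfl
            rw [htok]
            simp only []
            congr 1
            have hlp : (collectTime (findDash r) []).1.length ≤ n := by
              have e1 := List.IsSuffix.length_le hsuf3
              have e2 := List.IsSuffix.length_le hsuf2
              omega
            have hih := ih (String.ofList (collectTime (findDash r) []).1)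
              (by rw [String.toList_ofList]; exact hlp)
            rw [String.toList_ofList] at hih
            rw [hih]
            have hfix : PySem.Chars.upper (collectTime (findDash r) []).1 = (collectTime (findDash r) []).1 := by
              apply upper_of_fixed
              intro c hc
              exact upper_fixed (hsuf1.mem (hsuf2.mem (hsuf3.mem hc)))
            rw [hfix]
        . obtain ⟨hd1, hd2⟩ := bRun_noDash r d hdash
          have hA : get_token s = none := by simp [get_token, hl, hfd, hd1]
          rw [hA, hB1, hd2]

-- ===== VERDICT (by name: the statement is the Claim_ definition above) =====
theorem get_time_conditions_spec : Claim_equal_get_time_conditions := by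
  intro s _
  unfold Spec_get_time_conditions get_time_conditions_alt
  rw [PySem.Str.toList_upper]
  exact gtc_eq_bRun s.toList.length s le_rfl
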